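-- pv_equiv track=rewrite | github.com/Jodza45/VestackaInteligencija | lab1/3.py | uredi2
-- ===== SOURCE A (Python) =====
-- def uredi2(lista_brojeva, N, num):
--     nova_lista = []
--
--     for i in range(len(lista_brojeva)):
--         if i < N:
--             nova_lista.append(i + num)
--         else:
--             nova_lista.append(i - num)
--
--     return nova_lista
-- ===== SOURCE B (Python) =====
-- def uredi2(lista_brojeva, N, num):
--     n = len(lista_brojeva)
--     split = max(0, min(N, n))
--     return list(range(num, num + split)) + list(range(split - num, n - num))
-- ===== Notes on version B (the rewrite author's own statement) =====
-- stated objective: simpler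
-- what changed: Replaced the element-by-element loop with a branch by a closed-form construction: clamp N to [0, len] and concatenate the two arithmetic ranges range(num, num+split) and range(split-num, n-num).
import Mathlib
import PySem

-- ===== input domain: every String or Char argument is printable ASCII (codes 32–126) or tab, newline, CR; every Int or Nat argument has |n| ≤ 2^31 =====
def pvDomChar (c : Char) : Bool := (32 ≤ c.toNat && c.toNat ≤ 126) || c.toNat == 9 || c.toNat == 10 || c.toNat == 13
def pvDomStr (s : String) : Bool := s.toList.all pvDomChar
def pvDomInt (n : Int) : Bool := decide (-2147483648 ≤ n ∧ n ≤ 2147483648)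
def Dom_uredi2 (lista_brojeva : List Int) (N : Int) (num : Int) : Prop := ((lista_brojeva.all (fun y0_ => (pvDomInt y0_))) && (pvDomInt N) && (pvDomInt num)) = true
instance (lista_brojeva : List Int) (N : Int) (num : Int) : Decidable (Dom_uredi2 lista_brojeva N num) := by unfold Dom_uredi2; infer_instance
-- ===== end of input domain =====

-- B replaces A's index loop with a closed-form concatenation of two arithmetic ranges (simpler; same O(n) cost).

-- ===== PORT A =====
def uredi2 (lista_brojeva : List Int) (N : Int) (num : Int) : List Int :=
  (PySem.List.pyRange 0 (lista_brojeva.length : Int) 1).foldl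
    (fun nova_lista i =>
      if i < N then nova_lista ++ [i + num] else nova_lista ++ [i - num]) []

-- ===== PORT B =====
def uredi2_alt (lista_brojeva : List Int) (N : Int) (num : Int) : List Int :=
  let n : Int := (lista_brojeva.length : Int)
  let split : Int := max 0 (min N n)
  PySem.List.pyRange num (num + split) 1 ++ PySem.List.pyRange (split - num) (n - num) 1

-- ===== PRECONDITION & SPEC =====
def Spec_uredi2 (lista_brojeva : List Int) (N : Int) (num : Int) (out : List Int) : Prop := out = uredi2_alt lista_brojeva N num
instance (lista_brojeva : List Int) (N : Int) (num : Int) (out : List Int) : Decidable (Spec_uredi2 lista_brojeva N num out) := by unfold Spec_uredi2; infer_instance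

-- ===== CLAIM (what is proved, stated in full; the proofs are below) =====
def Claim_equal_uredi2 : Prop := ∀ (lista_brojeva : List Int) (N : Int) (num : Int), Dom_uredi2 lista_brojeva N num → Spec_uredi2 lista_brojeva N num (uredi2 lista_brojeva N num)

-- ===== LEMMAS AND PROOFS =====

theorem uredi2_eq (lista_brojeva : List Int) (N : Int) (num : Int) :
    uredi2 lista_brojeva N num = uredi2_alt lista_brojeva N num := by
  unfold uredi2 uredi2_alt
  set n : Int := (lista_brojeva.length : Int) with hn
  have hn0 : (0 : Int) ≤ n := Int.natCast_nonneg _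
  set m : Int := max 0 (min N n) with hm
  have hm0 : (0 : Int) ≤ m := by omega
  have hmn : m ≤ n := by omega
  have hfun : (fun (acc : List Int) (i : Int) =>
      if i < N then acc ++ [i + num] else acc ++ [i - num])
      = (fun acc i => acc ++ [if i < N then i + num else i - num]) := by
    funext acc i; split <;> rfl
  rw [hfun, PySem.List.foldl_append_singleton_eq_map, List.nil_append,
      PySem.List.pyRange_one_append 0 m n hm0 hmn, List.map_append]
  congr 1
  · rw [PySem.List.pyRange_one 0 m, PySem.List.pyRange_one num (num + m)]
    have h1 : (m - 0).toNat = (num + m - num).toNat := by omega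
    rw [List.map_map, h1]
    apply List.map_congr_left
    intro k hk
    have hk' : (k : Int) < num + m - num := by
      have := List.mem_range.mp hk; omega
    have hkN : (0 : Int) + (k : Int) < N := by omega
    simp only [Function.comp, if_pos hkN]; omega
  · rw [PySem.List.pyRange_one m n, PySem.List.pyRange_one (m - num) (n - num)]
    have h1 : (n - m).toNat = (n - num - (m - num)).toNat := by omega
    rw [List.map_map, h1]
    apply List.map_congr_left
    intro k hk
    have hk' : (k : Int) < n - num - (m - num) := by
      have := List.mem_range.mp hk; omega
    have hkN : ¬ (m + (k : Int) < N) := by omega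
    simp only [Function.comp, if_neg hkN]; omega

-- ===== VERDICT (by name: the statement is the Claim_ definition above) =====
theorem uredi2_spec : Claim_equal_uredi2 := by
  intro l N num _
  unfold Spec_uredi2
  exact uredi2_eq l N num
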